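-- pv_equiv track=rewrite | github.com/OlehDmytrenko/RecurrencePlot | __modules__/textProcessor.py | pymorphy2_built_bigrams
-- ===== SOURCE A (Python) =====
-- def pymorphy2_built_bigrams(WordsTags, TermsTags, stopWords):
--     for i in range(1, len(WordsTags)):
--         nw1 = WordsTags[i-1][0]
--         nw2 = WordsTags[i][0]
--         t1 = WordsTags[i-1][1]
--         t2 = WordsTags[i][1]
--         if (t1 == 'ADJF') and (t2 == 'NOUN') and (nw1 not in stopWords) and (nw2 not in stopWords):
--             TermsTags.insert([index for index, value in enumerate(TermsTags) if value == (nw2,t2)][-1], (nw1+'~'+nw2, t1+'~'+t2))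
--     return TermsTags
-- ===== SOURCE B (Python) =====
-- def pymorphy2_built_bigrams(WordsTags, TermsTags, stopWords):
--     stops = set(stopWords)
--     last = {v: i for i, v in enumerate(TermsTags)}
--     buckets = {}
--     for (nw1, t1), (nw2, t2) in zip(WordsTags, WordsTags[1:]):
--         if t1 == 'ADJF' and t2 == 'NOUN' and nw1 not in stops and nw2 not in stops and (nw2, t2) in last:
--             buckets.setdefault((nw2, t2), []).append((nw1 + '~' + nw2, t1 + '~' + t2))
--     out = []
--     for i, v in enumerate(TermsTags):
--         if last[v] == i and v in buckets:
--             out.extend(buckets[v])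
--         out.append(v)
--     return out
-- ===== Notes on version B (the rewrite author's own statement) =====
-- stated objective: alternative
-- what changed: replaces A's per-bigram rescan of TermsTags (enumerate+filter for the last matching index) and mid-list insert with a value-to-last-index dict, per-term bigram buckets collected in one pass over the word pairs, and a single-pass rebuild of the output (return value only: A mutates TermsTags in place, B builds a fresh list)
import Mathlib
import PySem

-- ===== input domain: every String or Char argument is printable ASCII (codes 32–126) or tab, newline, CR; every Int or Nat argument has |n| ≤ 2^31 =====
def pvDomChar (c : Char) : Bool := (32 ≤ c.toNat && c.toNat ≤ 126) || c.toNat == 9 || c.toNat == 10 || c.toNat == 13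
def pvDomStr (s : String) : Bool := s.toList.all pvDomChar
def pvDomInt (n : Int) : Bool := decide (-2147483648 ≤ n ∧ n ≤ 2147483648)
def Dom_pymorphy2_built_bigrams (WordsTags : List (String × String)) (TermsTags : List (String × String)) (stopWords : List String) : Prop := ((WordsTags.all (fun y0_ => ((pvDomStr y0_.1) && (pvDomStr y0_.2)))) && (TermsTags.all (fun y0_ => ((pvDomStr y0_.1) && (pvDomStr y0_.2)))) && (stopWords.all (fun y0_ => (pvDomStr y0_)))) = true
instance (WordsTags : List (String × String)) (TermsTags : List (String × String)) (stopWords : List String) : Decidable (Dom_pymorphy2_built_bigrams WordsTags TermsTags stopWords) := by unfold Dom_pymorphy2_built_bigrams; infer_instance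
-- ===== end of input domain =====

-- B replaces A's per-bigram rescan+insert with a last-index dict, per-term buckets and one rebuild pass
-- (equivalence is about the RETURN value: Python A mutates TermsTags in place, B builds a fresh list).

-- ===== PORT A =====
def pymorphy2_built_bigrams (WordsTags : List (String × String)) (TermsTags : List (String × String)) (stopWords : List String) : List (String × String) :=
  (PySem.List.pyRange 1 (WordsTags.length) 1).foldl (fun acc i =>
    match PySem.List.pyGet? WordsTags (i - 1), PySem.List.pyGet? WordsTags i with
    | some (nw1, t1), some (nw2, t2) =>
      if t1 = "ADJF" ∧ t2 = "NOUN" ∧ nw1 ∉ stopWords ∧ nw2 ∉ stopWords then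
        match PySem.List.pyGet? (((PySem.List.enumerate acc 0).filter (fun p : Int × (String × String) => p.2 == (nw2, t2))).map (fun x : Int × (String × String) => x.1)) (-1) with
        | some idx => PySem.List.insert acc idx (nw1 ++ "~" ++ nw2, t1 ++ "~" ++ t2)
        | none => acc  -- Python raises IndexError here; excluded by Pre_
      else acc
    | _, _ => acc) TermsTags

-- ===== PORT B =====
def pymorphy2_built_bigrams_alt (WordsTags : List (String × String)) (TermsTags : List (String × String)) (stopWords : List String) : List (String × String) :=
  let stops : PySem.Set String := PySem.Set.ofList stopWords
  let last : PySem.Dict (String × String) Int :=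
    (PySem.List.enumerate TermsTags 0).foldl (fun d p => d.insert p.2 p.1) PySem.Dict.empty
  let buckets : PySem.Dict (String × String) (List (String × String)) :=
    (WordsTags.zip (PySem.List.slice WordsTags (some 1) none)).foldl (fun b q =>
      if q.1.2 = "ADJF" ∧ q.2.2 = "NOUN" ∧ ¬ stops.contains q.1.1 ∧ ¬ stops.contains q.2.1 ∧ last.contains q.2 then
        b.insert q.2 (b.getD q.2 [] ++ [(q.1.1 ++ "~" ++ q.2.1, q.1.2 ++ "~" ++ q.2.2)])
      else b) PySem.Dict.empty
  (PySem.List.enumerate TermsTags 0).foldl (fun out p =>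
    (if last.get? p.2 = some p.1 ∧ buckets.contains p.2 then out ++ buckets.getD p.2 [] else out) ++ [p.2]) []

-- ===== PRECONDITION & SPEC =====
-- Pre_ excludes exactly the inputs where A raises IndexError: a qualifying adjacent
-- ADJF+NOUN non-stopword pair whose noun term (nw2,'NOUN') never occurs in TermsTags.
def Pre_pymorphy2_built_bigrams (WordsTags : List (String × String)) (TermsTags : List (String × String)) (stopWords : List String) : Prop :=
  ∀ q ∈ WordsTags.zip WordsTags.tail,
    (q.1.2 = "ADJF" ∧ q.2.2 = "NOUN" ∧ q.1.1 ∉ stopWords ∧ q.2.1 ∉ stopWords) → q.2 ∈ TermsTags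
instance (WordsTags : List (String × String)) (TermsTags : List (String × String)) (stopWords : List String) : Decidable (Pre_pymorphy2_built_bigrams WordsTags TermsTags stopWords) := by unfold Pre_pymorphy2_built_bigrams; infer_instance
def pvWitness_pymorphy2_built_bigrams : (List (String × String)) × (List (String × String)) × List String :=
  ([("big", "ADJF"), ("cat", "NOUN")], [("dog", "NOUN"), ("cat", "NOUN")], ["the"])

def Spec_pymorphy2_built_bigrams (WordsTags : List (String × String)) (TermsTags : List (String × String)) (stopWords : List String) (out : List (String × String)) : Prop := out = pymorphy2_built_bigrams_alt WordsTags TermsTags stopWords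
instance (WordsTags : List (String × String)) (TermsTags : List (String × String)) (stopWords : List String) (out : List (String × String)) : Decidable (Spec_pymorphy2_built_bigrams WordsTags TermsTags stopWords out) := by unfold Spec_pymorphy2_built_bigrams; infer_instance

-- ===== CLAIM (what is proved, stated in full; the proofs are below) =====
def Claim_equal_pymorphy2_built_bigrams : Prop := ∀ (WordsTags : List (String × String)) (TermsTags : List (String × String)) (stopWords : List String), Dom_pymorphy2_built_bigrams WordsTags TermsTags stopWords → Pre_pymorphy2_built_bigrams WordsTags TermsTags stopWords → Spec_pymorphy2_built_bigrams WordsTags TermsTags stopWords (pymorphy2_built_bigrams WordsTags TermsTags stopWords)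
-- ===== LEMMAS AND PROOFS =====

-- Abbreviations used only by the proofs.

-- the bigram built from an adjacent word pair
def pvBg (q : (String × String) × (String × String)) : String × String :=
  (q.1.1 ++ "~" ++ q.2.1, q.1.2 ++ "~" ++ q.2.2)

-- the qualifying condition of a word pair
abbrev pvCond (S : List String) (q : (String × String) × (String × String)) : Prop :=
  q.1.2 = "ADJF" ∧ q.2.2 = "NOUN" ∧ q.1.1 ∉ S ∧ q.2.1 ∉ S

-- index of the last occurrence of k in l
def pvLastIdx? (l : List (String × String)) (k : String × String) : Option Nat :=
  match l with
  | [] => none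
  | x :: xs =>
    match pvLastIdx? xs k with
    | some j => some (j + 1)
    | none => if x = k then some 0 else none

-- bucket function: the bigrams of the qualifying pairs of ps keyed at k (keys absent from T dropped)
def pvMOf (S : List String) (T : List (String × String)) (ps : List ((String × String) × (String × String))) (k : String × String) : List (String × String) :=
  match ps with
  | [] => []
  | q :: qs => (if pvCond S q ∧ q.2 = k ∧ q.2 ∈ T then [pvBg q] else []) ++ pvMOf S T qs k

-- interleave: before the LAST occurrence of each term v of T, the bucket m v
def pvBuild (T : List (String × String)) (m : (String × String) → List (String × String)) : List (String × String) :=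
  match T with
  | [] => []
  | v :: rest => (if v ∈ rest then [] else m v) ++ v :: pvBuild rest m

-- all bucket entries carry the tag "ADJF"++"~"++"NOUN"
def pvTagOK (m : (String × String) → List (String × String)) : Prop :=
  ∀ v x, x ∈ m v → x.2 = "ADJF" ++ "~" ++ "NOUN"

theorem pvLastIdx?_append (xs ys : List (String × String)) (k : String × String) :
    pvLastIdx? (xs ++ ys) k =
      match pvLastIdx? ys k with
      | some j => some (xs.length + j)
      | none => pvLastIdx? xs k := by
  induction xs with
  | nil =>
    simp only [List.nil_append, pvLastIdx?, List.length_nil]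
    cases pvLastIdx? ys k <;> simp
  | cons x xs ih =>
    simp only [List.cons_append, pvLastIdx?, ih]
    cases h : pvLastIdx? ys k with
    | none => rfl
    | some j => simp [List.length_cons]; omega

theorem pvLastIdx?_eq_none_iff (l : List (String × String)) (k : String × String) :
    pvLastIdx? l k = none ↔ k ∉ l := by
  induction l with
  | nil => simp [pvLastIdx?]
  | cons x xs ih =>
    simp only [pvLastIdx?, List.mem_cons]
    cases h : pvLastIdx? xs k with
    | some j => simp [h] at ih ⊢; tauto
    | none =>
      simp [h] at ih
      by_cases hx : x = k <;> simp [hx, ih]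
      exact fun h' => (hx h'.symm).elim

theorem pvLastIdx?_lt_length (l : List (String × String)) (k : String × String) (j : Nat)
    (h : pvLastIdx? l k = some j) : j < l.length := by
  induction l generalizing j with
  | nil => simp [pvLastIdx?] at h
  | cons x xs ih =>
    simp only [pvLastIdx?] at h
    cases h2 : pvLastIdx? xs k with
    | some j2 =>
      rw [h2] at h
      have := ih (j := j2) h2
      simp only [Option.some.injEq] at h
      have := ih (j := j2) h2
      simp [← h, List.length_cons]; omega
    | none =>
      rw [h2] at h
      by_cases hx : x = k
      · simp [hx] at h
        simp [← h]
      · simp [hx] at h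

theorem pvMem_build (T : List (String × String)) (m : _) (x : String × String)
    (h : x ∈ pvBuild T m) : x ∈ T ∨ ∃ v ∈ T, x ∈ m v := by
  induction T with
  | nil => simp [pvBuild] at h
  | cons v rest ih =>
    simp only [pvBuild, List.mem_append, List.mem_cons] at h
    rcases h with h | h | h
    · by_cases hv : v ∈ rest
      · simp [hv] at h
      · simp [hv] at h
        exact Or.inr ⟨v, by simp, h⟩
    · exact Or.inl (by simp [h])
    · rcases ih h with h' | ⟨w, hw, hx⟩
      · exact Or.inl (by simp [h'])
      · exact Or.inr ⟨w, by simp [hw], hx⟩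

theorem pvBuild_congr (T : List (String × String)) (m1 m2 : _)
    (h : ∀ v ∈ T, m1 v = m2 v) : pvBuild T m1 = pvBuild T m2 := by
  induction T with
  | nil => rfl
  | cons v rest ih =>
    simp only [pvBuild]
    rw [ih (fun w hw => h w (by simp [hw])), h v (by simp)]

theorem pvBuild_nil_fun (T : List (String × String)) : pvBuild T (fun _ => []) = T := by
  induction T with
  | nil => rfl
  | cons v rest ih => simp only [pvBuild, ih]; split <;> simp

theorem pvLastIdx?_build_none (T : List (String × String)) (m : _) (k : String × String)
    (hk : k.2 = "NOUN") (hm : pvTagOK m) (hmem : k ∉ T) :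
    pvLastIdx? (pvBuild T m) k = none := by
  rw [pvLastIdx?_eq_none_iff]
  intro hin
  rcases pvMem_build T m k hin with h | ⟨v, _, hv⟩
  · exact hmem h
  · have := hm v k hv
    rw [hk] at this
    exact absurd this (by decide)

theorem pvInsAt_append (xs ys : List (String × String)) (n : Nat) (x : String × String) :
    (xs ++ ys).take (xs.length + n) ++ x :: (xs ++ ys).drop (xs.length + n)
      = xs ++ (ys.take n ++ x :: ys.drop n) := by
  induction xs with
  | nil => simp
  | cons a xs ih => simpa [Nat.succ_add] using ih

-- the A-side step: insert at the last index of k turns build T m into build T (m with x appended at k)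
theorem pvStep_insert (T : List (String × String)) (m : _) (k x : String × String)
    (hk : k.2 = "NOUN") (hm : pvTagOK m) (hmem : k ∈ T) :
    ∃ j, pvLastIdx? (pvBuild T m) k = some j ∧
      (pvBuild T m).take j ++ x :: (pvBuild T m).drop j =
        pvBuild T (fun v => if v = k then m v ++ [x] else m v) := by
  induction T with
  | nil => simp at hmem
  | cons v rest ih =>
    have hbld : pvBuild (v :: rest) m
        = (if v ∈ rest then [] else m v) ++ (v :: pvBuild rest m) := rfl
    have hbld' : pvBuild (v :: rest) (fun w => if w = k then m w ++ [x] else m w)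
        = (if v ∈ rest then [] else (if v = k then m v ++ [x] else m v))
          ++ (v :: pvBuild rest (fun w => if w = k then m w ++ [x] else m w)) := rfl
    by_cases hkr : k ∈ rest
    · obtain ⟨j, hj, hins⟩ := ih hkr
      refine ⟨(if v ∈ rest then [] else m v).length + (j + 1), ?_, ?_⟩
      · rw [hbld, pvLastIdx?_append]
        simp only [pvLastIdx?, hj]
      · rw [hbld, pvInsAt_append, List.take_succ_cons, List.drop_succ_cons, List.cons_append, hins, hbld']
        by_cases hv : v ∈ rest
        · simp [hv]
        · have hvk : v ≠ k := fun h => hv (by rw [h]; exact hkr)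
          simp [hv, hvk]
    · have hvk : v = k := by
        rcases List.mem_cons.mp hmem with h | h
        · exact h.symm
        · exact absurd h hkr
      subst hvk
      have hnone : pvLastIdx? (pvBuild rest m) v = none :=
        pvLastIdx?_build_none rest m v hk hm hkr
      refine ⟨(m v).length, ?_, ?_⟩
      · rw [hbld, pvLastIdx?_append]
        simp only [pvLastIdx?, hnone]
        simp [hkr]
      · have hlen : (m v).length = (if v ∈ rest then [] else m v).length + 0 := by
          simp [hkr]
        rw [hbld, hlen, pvInsAt_append, hbld']
        have hcong : pvBuild rest (fun w => if w = v then m w ++ [x] else m w) = pvBuild rest m := by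
          apply pvBuild_congr
          intro w hw
          have : w ≠ v := fun h => hkr (h ▸ hw)
          simp [this]
        rw [hcong]
        simp [hkr]

-- A's index expression computes pvLastIdx?
theorem pvGetLast?_cons (a : Int) (l : List Int) :
    (a :: l).getLast? = some (l.getLast?.getD a) := by
  induction l generalizing a with
  | nil => rfl
  | cons b l ih => rw [List.getLast?_cons_cons, ih b]; rfl

theorem pvIdxExpr (l : List (String × String)) (k : String × String) (s : Int) :
    (((PySem.List.enumerate l s).filter (fun p => p.2 == k)).map (·.1)).getLast? =
      (pvLastIdx? l k).map (fun j : Nat => s + (j : Int)) := by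
  induction l generalizing s with
  | nil => simp [PySem.List.enumerate_nil, pvLastIdx?]
  | cons x xs ih =>
    rw [PySem.List.enumerate_cons]
    by_cases hx : x = k
    · subst hx
      simp only [List.filter_cons, beq_self_eq_true, if_true, List.map_cons]
      rw [pvGetLast?_cons, ih (s + 1)]
      simp only [pvLastIdx?]
      cases h : pvLastIdx? xs x with
      | some j => simp; omega
      | none => simp
    · have hbeq : (x == k) = false := beq_false_of_ne hx
      simp only [List.filter_cons, hbeq, Bool.false_eq_true, if_false]
      rw [ih (s + 1)]
      simp only [pvLastIdx?]
      cases h : pvLastIdx? xs k with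
      | some j => simp; omega
      | none => simp [hx]

-- the A-side loop over the word pairs, in terms of pvBuild
theorem pvFoldA (S : List String) (T : List (String × String))
    (ps : List ((String × String) × (String × String))) (m : _) (hm : pvTagOK m) :
    ps.foldl (fun acc q =>
      if q.1.2 = "ADJF" ∧ q.2.2 = "NOUN" ∧ q.1.1 ∉ S ∧ q.2.1 ∉ S then
        match PySem.List.pyGet? (((PySem.List.enumerate acc 0).filter (fun p => p.2 == q.2)).map (·.1)) (-1) with
        | some idx => PySem.List.insert acc idx (q.1.1 ++ "~" ++ q.2.1, q.1.2 ++ "~" ++ q.2.2)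
        | none => acc
      else acc) (pvBuild T m)
    = pvBuild T (fun v => m v ++ pvMOf S T ps v) := by
  induction ps generalizing m with
  | nil =>
    simp only [List.foldl_nil]
    exact (pvBuild_congr _ _ _ (fun v _ => by simp [pvMOf])).symm
  | cons q qs ih =>
    simp only [List.foldl_cons]
    by_cases hc : q.1.2 = "ADJF" ∧ q.2.2 = "NOUN" ∧ q.1.1 ∉ S ∧ q.2.1 ∉ S
    · rw [if_pos hc]
      by_cases hqT : q.2 ∈ T
      · obtain ⟨j, hj, hins⟩ := pvStep_insert T m q.2 (pvBg q) hc.2.1 hm hqT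
        rw [PySem.List.pyGet?_neg_one, pvIdxExpr _ _ 0, hj]
        simp only [Option.map_some, zero_add]
        have hlt : j < (pvBuild T m).length := pvLastIdx?_lt_length _ _ _ hj
        rw [PySem.List.insert_natCast _ j _ (le_of_lt hlt)]
        have hbg : (q.1.1 ++ "~" ++ q.2.1, q.1.2 ++ "~" ++ q.2.2) = pvBg q := rfl
        rw [hbg, hins]
        have hm' : pvTagOK (fun v => if v = q.2 then m v ++ [pvBg q] else m v) := by
          intro v x hx
          dsimp only at hx
          split_ifs at hx with hv
          · rcases List.mem_append.mp hx with hx | hx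
            · exact hm _ _ hx
            · have hx' : x = pvBg q := List.mem_singleton.mp hx
              subst hx'
              show q.1.2 ++ "~" ++ q.2.2 = "ADJF" ++ "~" ++ "NOUN"
              rw [hc.1, hc.2.1]
          · exact hm _ _ hx
        rw [ih _ hm']
        apply pvBuild_congr
        intro v _
        by_cases hv : v = q.2
        · subst hv
          simp [pvMOf, pvCond, hc.1, hc.2.1, hc.2.2.1, hc.2.2.2, hqT]
        · have hne : ¬ (pvCond S q ∧ q.2 = v ∧ q.2 ∈ T) := fun h => hv h.2.1.symm
          simp [pvMOf, hv, hne]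
      · have hnone : pvLastIdx? (pvBuild T m) q.2 = none :=
          pvLastIdx?_build_none T m q.2 hc.2.1 hm hqT
        rw [PySem.List.pyGet?_neg_one, pvIdxExpr _ _ 0, hnone]
        simp only [Option.map_none]
        rw [ih _ hm]
        apply pvBuild_congr
        intro v _
        have hne : ¬ (pvCond S q ∧ q.2 = v ∧ q.2 ∈ T) := fun h => hqT h.2.2
        simp [pvMOf, hne]
    · rw [if_neg hc]
      rw [ih _ hm]
      apply pvBuild_congr
      intro v _
      have hne : ¬ (pvCond S q ∧ q.2 = v ∧ q.2 ∈ T) := fun h => hc h.1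
      simp [pvMOf, hne]

-- auxiliary: the indexed loop over a suffix, with the prefix length as offset
theorem pvPairsA_aux (f : List (String × String) → ((String × String) × (String × String)) → List (String × String))
    (rest : List (String × String)) :
    ∀ (pre : List (String × String)) (x : String × String) (acc : List (String × String)),
    (PySem.List.pyRange ((pre.length : Int) + 1) ((pre.length : Int) + 1 + rest.length) 1).foldl (fun acc i =>
      match PySem.List.pyGet? (pre ++ x :: rest) (i - 1), PySem.List.pyGet? (pre ++ x :: rest) i with
      | some a, some b => f acc (a, b)
      | _, _ => acc) acc
    = ((x :: rest).zip rest).foldl f acc := by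
  induction rest with
  | nil =>
    intro pre x acc
    simp [PySem.List.pyRange_one_eq_nil]
  | cons y rest' ih =>
    intro pre x acc
    rw [PySem.List.pyRange_one_cons (by simp only [List.length_cons]; push_cast; omega)]
    simp only [List.foldl_cons]
    have h1 : PySem.List.pyGet? (pre ++ x :: y :: rest') ((pre.length : Int) + 1 - 1) = some x := by
      simp [PySem.List.pyGet?_append_length (pre := pre) (y := x) (ys := y :: rest')]
    have h2 : PySem.List.pyGet? (pre ++ x :: y :: rest') ((pre.length : Int) + 1) = some y := by
      have := PySem.List.pyGet?_append_length (pre := pre ++ [x]) (y := y) (ys := rest')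
      simpa [List.append_assoc] using this
    rw [h1, h2]
    have h3 := ih (pre ++ [x]) y (f acc (x, y))
    simp only [List.length_append, List.length_cons, List.length_nil] at h3
    rw [show ((pre.length : Int) + 1 + 1) = ((pre.length + 1 : Nat) : Int) + 1 from by push_cast; ring]
    rw [show ((pre.length : Int) + 1 + ((y :: rest').length : Int)) = ((pre.length + 1 : Nat) : Int) + 1 + rest'.length from by push_cast; simp; ring]
    rw [show pre ++ x :: y :: rest' = (pre ++ [x]) ++ y :: rest' from by simp]
    rw [h3]
    simp [List.zip]

-- the pyRange-indexed loop of port A is the loop over the adjacent pairs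
theorem pvPairsA (W : List (String × String)) (f : List (String × String) → ((String × String) × (String × String)) → List (String × String)) (acc : List (String × String)) :
    (PySem.List.pyRange 1 (W.length) 1).foldl (fun acc i =>
      match PySem.List.pyGet? W (i - 1), PySem.List.pyGet? W i with
      | some a, some b => f acc (a, b)
      | _, _ => acc) acc
    = (W.zip W.tail).foldl f acc := by
  cases W with
  | nil => simp [PySem.List.pyRange_one_eq_nil]
  | cons x rest =>
    have h := pvPairsA_aux f rest [] x acc
    simp only [List.length_nil, Nat.cast_zero, zero_add, List.nil_append] at h
    rw [show ((x :: rest).length : Int) = 1 + (rest.length : Int) from by push_cast [List.length_cons]; ring]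
    rw [h]
    rfl

-- B's last dict computes pvLastIdx?
theorem pvLastDict (T : List (String × String)) (k : String × String) (s : Int) (d0 : PySem.Dict (String × String) Int) :
    (((PySem.List.enumerate T s).foldl (fun d p => d.insert p.2 p.1) d0).get? k) =
      match pvLastIdx? T k with
      | some j => some (s + (j : Int))
      | none => d0.get? k := by
  induction T generalizing s d0 with
  | nil => simp [PySem.List.enumerate_nil, pvLastIdx?]
  | cons x xs ih =>
    rw [PySem.List.enumerate_cons]
    simp only [List.foldl_cons]
    rw [ih (s + 1) (d0.insert x s)]
    simp only [pvLastIdx?]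
    cases h : pvLastIdx? xs k with
    | some j => simp; omega
    | none =>
      by_cases hx : x = k
      · subst hx
        rw [PySem.Dict.get?_insert_self]
        simp
      · rw [PySem.Dict.get?_insert_of_ne _ _ (fun h => hx h.symm)]
        simp [hx]

-- B's buckets dict accumulates pvMOf
theorem pvBucketsDict (S : List String) (T : List (String × String))
    (ps : List ((String × String) × (String × String)))
    (b : PySem.Dict (String × String) (List (String × String))) (k : String × String) :
    ((ps.foldl (fun b q =>
        if q.1.2 = "ADJF" ∧ q.2.2 = "NOUN" ∧ ¬ (PySem.Set.ofList S).contains q.1.1 ∧ ¬ (PySem.Set.ofList S).contains q.2.1 ∧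
            ((PySem.List.enumerate T 0).foldl (fun d p => d.insert p.2 p.1) PySem.Dict.empty).contains q.2 then
          b.insert q.2 (b.getD q.2 [] ++ [(q.1.1 ++ "~" ++ q.2.1, q.1.2 ++ "~" ++ q.2.2)])
        else b) b).getD k [])
    = b.getD k [] ++ pvMOf S T ps k := by
  induction ps generalizing b with
  | nil => simp [pvMOf]
  | cons q qs ih =>
    simp only [List.foldl_cons]
    have hcond : (q.1.2 = "ADJF" ∧ q.2.2 = "NOUN" ∧ ¬ (PySem.Set.ofList S).contains q.1.1 ∧ ¬ (PySem.Set.ofList S).contains q.2.1 ∧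
        ((PySem.List.enumerate T 0).foldl (fun d p => d.insert p.2 p.1) PySem.Dict.empty).contains q.2)
        ↔ (pvCond S q ∧ q.2 ∈ T) := by
      rw [PySem.Dict.contains_eq_isSome_get?, pvLastDict T q.2 0 PySem.Dict.empty]
      unfold pvCond
      cases h : pvLastIdx? T q.2 with
      | some j =>
        have hmem : q.2 ∈ T := by
          by_contra hmem
          rw [Iff.mpr (pvLastIdx?_eq_none_iff _ _) hmem] at h
          simp at h
        simp [PySem.Set.contains_eq_listContains, PySem.Set.mem_ofList, hmem]
        try tauto
      | none =>
        have hmem : q.2 ∉ T := Iff.mp (pvLastIdx?_eq_none_iff _ _) h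
        simp [PySem.Dict.get?_empty, hmem]
    by_cases hc : pvCond S q ∧ q.2 ∈ T
    · rw [if_pos (hcond.mpr hc)]
      rw [ih]
      simp only [pvMOf]
      by_cases hk : q.2 = k
      · subst hk
        rw [PySem.Dict.getD_insert]
        rw [if_pos (show pvCond S q ∧ q.2 = q.2 ∧ q.2 ∈ T from ⟨hc.1, rfl, hc.2⟩)]
        simp [pvBg]
      · rw [PySem.Dict.getD_insert]
        have h1 : ¬ (pvCond S q ∧ q.2 = k ∧ q.2 ∈ T) := fun h => hk h.2.1
        have h2 : ¬ (k = q.2) := fun h => hk h.symm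
        simp [h1, h2]
    · rw [if_neg (fun h => hc (hcond.mp h))]
      rw [ih]
      have : ¬ (pvCond S q ∧ q.2 = k ∧ q.2 ∈ T) := fun h => hc ⟨h.1, h.2.2⟩
      simp [pvMOf, this]

-- B's rebuild loop produces pvBuild
theorem pvRebuild (T pre T' : List (String × String)) (hT : T = pre ++ T')
    (buckets : PySem.Dict (String × String) (List (String × String)))
    (acc : List (String × String)) :
    (PySem.List.enumerate T' (pre.length)).foldl (fun out p =>
      (if (((PySem.List.enumerate T 0).foldl (fun d q => d.insert q.2 q.1) PySem.Dict.empty).get? p.2 = some p.1 ∧ buckets.contains p.2) then out ++ buckets.getD p.2 [] else out) ++ [p.2]) acc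
    = acc ++ pvBuild T' (fun v => buckets.getD v []) := by
  induction T' generalizing pre acc with
  | nil => simp [PySem.List.enumerate_nil, pvBuild]
  | cons v rest ih =>
    rw [PySem.List.enumerate_cons]
    simp only [List.foldl_cons]
    have hlast := pvLastDict T v 0 (PySem.Dict.empty (κ := String × String) (ν := Int))
    have hvT : pvLastIdx? T v = some (pre.length + (match pvLastIdx? rest v with | some j => j + 1 | none => 0)) := by
      rw [hT, pvLastIdx?_append]
      simp only [pvLastIdx?]
      cases h : pvLastIdx? rest v with
      | some j => rfl
      | none => simp
    rw [hvT] at hlast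
    have hcnd : (((PySem.List.enumerate T 0).foldl (fun d q => d.insert q.2 q.1) PySem.Dict.empty).get? v = some ((pre.length : Nat) : Int))
        ↔ v ∉ rest := by
      rw [hlast]
      cases h : pvLastIdx? rest v with
      | some j =>
        have hmm : v ∈ rest := by
          by_contra hm
          rw [Iff.mpr (pvLastIdx?_eq_none_iff _ _) hm] at h
          simp at h
        simp [hmm]
        omega
      | none =>
        simp [Iff.mp (pvLastIdx?_eq_none_iff _ _) h]
    have hstep : ((if (((PySem.List.enumerate T 0).foldl (fun d q => d.insert q.2 q.1) PySem.Dict.empty).get? v = some ((pre.length : Nat) : Int) ∧ buckets.contains v) then acc ++ buckets.getD v [] else acc) ++ [v])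
        = acc ++ ((if v ∈ rest then [] else buckets.getD v []) ++ [v]) := by
      by_cases hm : v ∈ rest
      · rw [if_neg (fun h => (hcnd.mp h.1) hm)]
        simp [hm]
      · by_cases hb : buckets.contains v
        · rw [if_pos ⟨hcnd.mpr hm, hb⟩]
          simp [hm]
        · rw [if_neg (fun h => hb h.2)]
          rw [PySem.Dict.getD_of_not_contains _ _ (by simpa using hb)]
          simp [hm]
    rw [hstep]
    have hT' : T = (pre ++ [v]) ++ rest := by rw [hT]; simp
    have harith : ((pre.length : Nat) : Int) + 1 = (((pre ++ [v]).length : Nat) : Int) := by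
      simp
    rw [harith, ih (pre ++ [v]) hT']
    show _ = acc ++ pvBuild (v :: rest) fun w => buckets.getD w []
    rw [show pvBuild (v :: rest) (fun w => buckets.getD w [])
          = (if v ∈ rest then [] else buckets.getD v []) ++ v :: pvBuild rest (fun w => buckets.getD w []) from rfl]
    simp

theorem pvA_eq (W T : List (String × String)) (S : List String) :
    pymorphy2_built_bigrams W T S = pvBuild T (pvMOf S T (W.zip W.tail)) := by
  unfold pymorphy2_built_bigrams
  have hbody : (fun (acc : List (String × String)) (i : Int) =>
      match PySem.List.pyGet? W (i - 1), PySem.List.pyGet? W i with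
      | some (nw1, t1), some (nw2, t2) =>
        if t1 = "ADJF" ∧ t2 = "NOUN" ∧ nw1 ∉ S ∧ nw2 ∉ S then
          match PySem.List.pyGet? (((PySem.List.enumerate acc 0).filter (fun p : Int × (String × String) => p.2 == (nw2, t2))).map (fun x : Int × (String × String) => x.1)) (-1) with
          | some idx => PySem.List.insert acc idx (nw1 ++ "~" ++ nw2, t1 ++ "~" ++ t2)
          | none => acc
        else acc
      | _, _ => acc)
      = (fun acc i =>
      match PySem.List.pyGet? W (i - 1), PySem.List.pyGet? W i with
      | some a, some b =>
        (fun acc (q : (String × String) × (String × String)) =>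
          if q.1.2 = "ADJF" ∧ q.2.2 = "NOUN" ∧ q.1.1 ∉ S ∧ q.2.1 ∉ S then
            match PySem.List.pyGet? (((PySem.List.enumerate acc 0).filter (fun p : Int × (String × String) => p.2 == q.2)).map (fun x : Int × (String × String) => x.1)) (-1) with
            | some idx => PySem.List.insert acc idx (q.1.1 ++ "~" ++ q.2.1, q.1.2 ++ "~" ++ q.2.2)
            | none => acc
          else acc) acc (a, b)
      | _, _ => acc) := by
    funext acc i
    cases PySem.List.pyGet? W (i - 1) with
    | none => rfl
    | some a =>
      cases PySem.List.pyGet? W i with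
      | none => rfl
      | some b =>
        rcases a with ⟨nw1, t1⟩
        rcases b with ⟨nw2, t2⟩
        rfl
  rw [hbody, pvPairsA W (fun acc (q : (String × String) × (String × String)) =>
      if q.1.2 = "ADJF" ∧ q.2.2 = "NOUN" ∧ q.1.1 ∉ S ∧ q.2.1 ∉ S then
        match PySem.List.pyGet? (((PySem.List.enumerate acc 0).filter (fun p : Int × (String × String) => p.2 == q.2)).map (fun x : Int × (String × String) => x.1)) (-1) with
        | some idx => PySem.List.insert acc idx (q.1.1 ++ "~" ++ q.2.1, q.1.2 ++ "~" ++ q.2.2)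
        | none => acc
      else acc) T]
  conv_lhs => rw [show T = pvBuild T (fun _ => []) from (pvBuild_nil_fun T).symm]
  rw [pvFoldA S T (W.zip W.tail) (fun _ => []) (fun v x hx => absurd hx (List.not_mem_nil))]
  apply pvBuild_congr
  intro v _
  simp

theorem pvB_eq (W T : List (String × String)) (S : List String) :
    pymorphy2_built_bigrams_alt W T S = pvBuild T (pvMOf S T (W.zip W.tail)) := by
  unfold pymorphy2_built_bigrams_alt
  simp only [PySem.List.slice_from_one]
  have h := pvRebuild T [] T (by simp)
  simp only [List.length_nil, Nat.cast_zero] at h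
  rw [h]
  apply pvBuild_congr
  intro v _
  rw [pvBucketsDict S T (W.zip W.tail) PySem.Dict.empty v]
  simp [PySem.Dict.getD_empty]

-- ===== VERDICT (by name: the statement is the Claim_ definition above) =====
theorem pymorphy2_built_bigrams_spec : Claim_equal_pymorphy2_built_bigrams := by
  intro W T S _ _
  unfold Spec_pymorphy2_built_bigrams
  rw [pvA_eq, pvB_eq]
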